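-- pv_equiv track=rewrite | github.com/daleysoftware/codeeval | 1-moderate/consecutive-primes/main.py | count_possible_necklace_arrangements
-- ===== SOURCE A (Python) =====
-- PRIMES = {2, 3, 5, 7, 11, 13, 17, 19, 23, 29, 31}
--
-- def count_possible_necklace_arrangements(beads, pos):
--     if len(beads) == pos:
--         return 1 if 1 + beads[- 1] in PRIMES else 0
--     result = 0
--     if beads[pos] + beads[pos-1] in PRIMES:
--         result += count_possible_necklace_arrangements(beads, pos + 1)
--     for i in range(pos+2, len(beads), 2):
--         if beads[pos-1] + beads[i] in PRIMES:
--             beads[i], beads[pos] = beads[pos], beads[i]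
--             result += count_possible_necklace_arrangements(beads, pos + 1)
--             beads[i], beads[pos] = beads[pos], beads[i]
--     return result
-- ===== SOURCE B (Python) =====
-- PRIMES = {2, 3, 5, 7, 11, 13, 17, 19, 23, 29, 31}
--
-- def _every_second(l):
--     # l[::2] by recursion
--     if not l:
--         return []
--     return [l[0]] + _every_second(l[2:])
--
-- def _picks(l):
--     # all ways to pick one element of l: (element, remaining elements)
--     if not l:
--         return []
--     a, t = l[0], l[1:]
--     return [(a, t)] + [(b, [a] + r) for (b, r) in _picks(t)]
--
-- def _count(prev, cur, oth):
--     # arrangements alternating between the two remaining classes, each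
--     # neighbouring sum prime, closing with bead 1 after the last bead
--     if not cur:
--         return 1 if 1 + prev in PRIMES else 0
--     return sum(_count(a, oth, r) for (a, r) in _picks(cur) if prev + a in PRIMES)
--
-- def count_possible_necklace_arrangements(beads, pos):
--     if len(beads) == pos:
--         return 1 if 1 + beads[-1] in PRIMES else 0
--     return _count(beads[pos - 1], _every_second(beads[pos:]), _every_second(beads[pos + 1:]))
-- ===== Notes on version B (the rewrite author's own statement) =====
-- stated objective: alternative
-- what changed: Replaces A's in-place swap backtracking over array indices (stride-2 swap loop with mutation and undo) by a pure recursion over the two parity classes of remaining beads, extracted once by slicing, with each candidate chosen via an element/rest decomposition and no mutation.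
-- outside the precondition, e.g. on count_possible_necklace_arrangements([1, 2], -1): A returns 2, B returns 1; on count_possible_necklace_arrangements([], 0): A raises IndexError, B raises IndexError; on count_possible_necklace_arrangements([1, 2], 5): A raises IndexError, B raises IndexError
import Mathlib
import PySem

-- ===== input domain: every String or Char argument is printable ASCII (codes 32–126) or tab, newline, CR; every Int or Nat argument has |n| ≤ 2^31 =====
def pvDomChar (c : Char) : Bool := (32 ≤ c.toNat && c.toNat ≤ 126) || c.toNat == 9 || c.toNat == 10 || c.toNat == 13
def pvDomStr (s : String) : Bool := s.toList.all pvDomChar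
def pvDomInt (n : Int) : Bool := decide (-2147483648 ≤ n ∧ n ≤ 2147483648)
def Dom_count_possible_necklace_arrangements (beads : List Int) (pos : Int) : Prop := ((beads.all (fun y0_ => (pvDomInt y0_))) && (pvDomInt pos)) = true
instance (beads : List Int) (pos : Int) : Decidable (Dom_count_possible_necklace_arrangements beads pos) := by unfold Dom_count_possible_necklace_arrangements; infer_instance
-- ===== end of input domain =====

-- B replaces A's in-place swap backtracking over array indices by a pure recursion on the
-- two parity classes of remaining beads (alternative decomposition, no mutation; same cost).
-- A swaps list elements in place but always restores them before returning, so the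
-- argument list is unchanged when A returns.


-- ===== PORT A =====
-- the module constant PRIMES = {2, 3, 5, 7, 11, 13, 17, 19, 23, 29, 31}
def pvPRIMES : PySem.Set Int := PySem.Set.ofList [2, 3, 5, 7, 11, 13, 17, 19, 23, 29, 31]

-- beads[i] (Python indexing, negative from the end); exact where the index is in range
def pvGet (beads : List Int) (i : Int) : Int := PySem.List.pyGetD beads i 0

-- 'beads[i], beads[pos] = beads[pos], beads[i]'; exact for in-range indices
def pvSwap (beads : List Int) (pos i : Int) : List Int :=
  PySem.List.pySetD (PySem.List.pySetD beads i (pvGet beads pos)) pos (pvGet beads i)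

-- A's recursion, fueled (the Python recurses from pos up to len(beads); fuel len+1 suffices
-- on Pre_); 'result' starts as the pos-stays branch and the loop adds the swap branches.
def pvAgo : Nat → List Int → Int → Int
  | 0, _, _ => 0
  | fuel+1, beads, pos =>
    if (beads.length : Int) = pos then
      (if PySem.Set.contains pvPRIMES (1 + pvGet beads (-1)) then 1 else 0)
    else
      (PySem.List.pyRange (pos + 2) (beads.length : Int) 2).foldl
        (fun acc i =>
          if PySem.Set.contains pvPRIMES (pvGet beads (pos - 1) + pvGet beads i) then
            acc + pvAgo fuel (pvSwap beads pos i) (pos + 1)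
          else acc)
        (if PySem.Set.contains pvPRIMES (pvGet beads pos + pvGet beads (pos - 1)) then
          pvAgo fuel beads (pos + 1)
        else 0)

def count_possible_necklace_arrangements (beads : List Int) (pos : Int) : Int :=
  pvAgo ((beads.length + 1 - pos).toNat) beads pos

-- ===== PORT B =====
-- _every_second(l): l[::2] by recursion
def pvEvery : List Int → List Int
  | [] => []
  | a :: t => [a] ++ pvEvery (PySem.List.slice (a :: t) (some 2) none)
termination_by l => l.length
decreasing_by
  rw [PySem.List.slice_from _ (by omega)]
  simp

-- _picks(l): all ways to pick one element of l: (element, remaining elements)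
def pvPicks : List Int → List (Int × List Int)
  | [] => []
  | a :: t => (a, t) :: (pvPicks t).map (fun q => (q.1, a :: q.2))

-- cited by pvCount's termination proof
theorem pvPicks_snd_length : ∀ (l : List Int), ∀ q ∈ pvPicks l, q.2.length + 1 = l.length := by
  intro l
  induction l with
  | nil => simp [pvPicks]
  | cons a t ih =>
    intro q hq
    simp only [pvPicks, List.mem_cons, List.mem_map] at hq
    rcases hq with rfl | ⟨r, hr, rfl⟩
    · simp
    · have := ih r hr
      simp [this]

-- _count(prev, cur, oth)
def pvCount (prev : Int) (cur oth : List Int) : Int :=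
  match cur with
  | [] => if PySem.Set.contains pvPRIMES (1 + prev) then 1 else 0
  | c :: t =>
    ((pvPicks (c :: t)).attach.map (fun q =>
      if PySem.Set.contains pvPRIMES (prev + q.1.1) then pvCount q.1.1 oth q.1.2 else 0)).sum
termination_by cur.length + oth.length
decreasing_by
  have := pvPicks_snd_length _ q.1 q.2
  simp at this ⊢
  omega

def count_possible_necklace_arrangements_alt (beads : List Int) (pos : Int) : Int :=
  if (beads.length : Int) = pos then
    (if PySem.Set.contains pvPRIMES (1 + pvGet beads (-1)) then 1 else 0)
  else
    pvCount (pvGet beads (pos - 1))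
      (pvEvery (PySem.List.slice beads (some pos) none))
      (pvEvery (PySem.List.slice beads (some (pos + 1)) none))

-- ===== PRECONDITION & SPEC =====
-- Pre_ excludes the empty list and pos > len(beads), where A raises IndexError, and pos < 0,
-- where A's reads go through Python's negative-index wraparound, outside the recursion's
-- natural domain 0 ≤ pos ≤ len(beads).
def Pre_count_possible_necklace_arrangements (beads : List Int) (pos : Int) : Prop :=
  beads ≠ [] ∧ 0 ≤ pos ∧ pos ≤ beads.length
instance (beads : List Int) (pos : Int) : Decidable (Pre_count_possible_necklace_arrangements beads pos) := by unfold Pre_count_possible_necklace_arrangements; infer_instance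

def pvWitness_count_possible_necklace_arrangements : List Int × Int := ([1, 2, 4], 0)

def Spec_count_possible_necklace_arrangements (beads : List Int) (pos : Int) (out : Int) : Prop := out = count_possible_necklace_arrangements_alt beads pos
instance (beads : List Int) (pos : Int) (out : Int) : Decidable (Spec_count_possible_necklace_arrangements beads pos out) := by unfold Spec_count_possible_necklace_arrangements; infer_instance

-- ===== CLAIM (what is proved, stated in full; the proofs are below) =====
def Claim_equal_count_possible_necklace_arrangements : Prop := ∀ (beads : List Int) (pos : Int), Dom_count_possible_necklace_arrangements beads pos → Pre_count_possible_necklace_arrangements beads pos → Spec_count_possible_necklace_arrangements beads pos (count_possible_necklace_arrangements beads pos)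

-- ===== LEMMAS AND PROOFS =====

theorem pvEvery_nil : pvEvery [] = [] := by simp [pvEvery]

theorem pvEvery_cons (a : Int) (t : List Int) : pvEvery (a :: t) = a :: pvEvery (t.drop 1) := by
  conv_lhs => simp only [pvEvery]
  rw [PySem.List.slice_from _ (by omega)]
  simp

theorem pvEvery_getElem? : ∀ (l : List Int) (j : Nat), (pvEvery l)[j]? = l[2 * j]? := by
  intro l
  induction l using pvEvery.induct with
  | case1 => simp [pvEvery_nil]
  | case2 a t ih =>
    intro j
    rw [pvEvery_cons]
    match j with
    | 0 => simp
    | j + 1 =>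
      rw [PySem.List.slice_from _ (by omega)] at ih
      simp only [List.getElem?_cons_succ]
      have hd : (List.drop ((2:Int)).toNat (a :: t)) = t.drop 1 := by simp
      rw [hd] at ih
      rw [ih]
      have h2 : 2 * (j + 1) = (2 * j + 1) + 1 := by omega
      rw [h2, List.getElem?_cons_succ, List.getElem?_drop]
      congr 1
      omega

theorem pvEvery_length (l : List Int) : (pvEvery l).length = (l.length + 1) / 2 := by
  induction l using pvEvery.induct with
  | case1 => simp [pvEvery_nil]
  | case2 a t ih =>
    rw [PySem.List.slice_from _ (by omega)] at ih
    rw [pvEvery_cons]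
    simp only [List.length_cons]
    have hd : (List.drop ((2:Int)).toNat (a :: t)) = t.drop 1 := by simp
    rw [hd] at ih
    rw [ih]
    simp only [List.length_drop]
    omega

-- pvEvery of a dropped suffix, head peeled off
theorem pvEvery_drop_cons (l : List Int) (p : Nat) (h : p < l.length) :
    pvEvery (l.drop p) = l[p] :: pvEvery (l.drop (p + 2)) := by
  rw [List.drop_eq_getElem_cons h, pvEvery_cons, List.drop_drop]

-- setting an index that the stride-2 view over drop p never reads leaves the view unchanged
theorem pvEvery_drop_set_ne (l : List Int) (p q : Nat) (x : Int)
    (h : ∀ j : Nat, q ≠ p + 2 * j) :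
    pvEvery ((l.set q x).drop p) = pvEvery (l.drop p) := by
  apply List.ext_getElem?
  intro j
  rw [pvEvery_getElem?, pvEvery_getElem?, List.getElem?_drop, List.getElem?_drop,
    List.getElem?_set_ne (by have := h j; omega)]

-- setting index p + 2·m sets slot m of the stride-2 view over drop p
theorem pvEvery_drop_set_even (l : List Int) (p m : Nat) (x : Int)
    (h : p + 2 * m < l.length) :
    pvEvery ((l.set (p + 2 * m) x).drop p) = (pvEvery (l.drop p)).set m x := by
  apply List.ext_getElem?
  intro j
  rw [pvEvery_getElem?, List.getElem?_drop, List.getElem?_set, List.getElem?_set,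
    pvEvery_getElem?, List.getElem?_drop, pvEvery_length, List.length_drop]
  split_ifs <;> first | rfl | omega

-- l with slot m overwritten by x is a permutation of x consed onto l minus slot m
theorem pv_set_perm : ∀ (l : List Int) (m : Nat) (x : Int), m < l.length →
    (l.set m x).Perm (x :: l.eraseIdx m) := by
  intro l
  induction l with
  | nil => intro m x h; simp at h
  | cons a t ih =>
    intro m x h
    match m with
    | 0 => simp
    | m + 1 =>
      simp only [List.set_cons_succ, List.eraseIdx_cons_succ]
      exact ((ih m x (by simpa using h)).cons a).trans (List.Perm.swap x a _)

-- pvPicks, reindexed over positions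
theorem pvPicks_map {β : Type} (f : Int × List Int → β) : ∀ (l : List Int),
    (pvPicks l).map f = (List.range l.length).map (fun j => f (l.getD j 0, l.eraseIdx j)) := by
  intro l
  induction l generalizing f with
  | nil => simp [pvPicks]
  | cons a t ih =>
    simp only [pvPicks, List.map_cons, List.map_map, List.length_cons, List.range_succ_eq_map,
      List.map_cons, List.map_map]
    congr 1
    rw [ih]
    apply List.map_congr_left
    intro j hj
    simp [Nat.succ_eq_add_one]

theorem pvCount_nil (prev : Int) (oth : List Int) :
    pvCount prev [] oth = if PySem.Set.contains pvPRIMES (1 + prev) then 1 else 0 := by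
  simp [pvCount]

theorem pvCount_cons (prev c : Int) (t oth : List Int) :
    pvCount prev (c :: t) oth =
      ((pvPicks (c :: t)).map (fun q =>
        if PySem.Set.contains pvPRIMES (prev + q.1) then pvCount q.1 oth q.2 else 0)).sum := by
  rw [pvCount]
  exact congrArg List.sum (List.attach_map_val (f := fun q : Int × List Int =>
    if PySem.Set.contains pvPRIMES (prev + q.1) then pvCount q.1 oth q.2 else 0))

-- the sum over picks is invariant under permuting the picked-from list, for any summand
-- invariant under permuting the rest (rests are shorter than the picked-from list)
theorem pvPicks_sum_perm : ∀ {c c' : List Int}, c.Perm c' → ∀ (f : Int → List Int → Int),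
    (∀ a r r', r.length < c.length → r.Perm r' → f a r = f a r') →
    ((pvPicks c).map (fun q => f q.1 q.2)).sum = ((pvPicks c').map (fun q => f q.1 q.2)).sum := by
  intro c c' h
  induction h with
  | nil => intro f hf; rfl
  | cons x h ih =>
    intro f hf
    simp only [pvPicks, List.map_cons, List.map_map, List.sum_cons]
    rw [hf x _ _ (by simp) h]
    congr 1
    exact ih (fun a r => f a (x :: r))
      (fun a r r' hlen hr => hf a _ _ (by simp at hlen ⊢; omega) (hr.cons x))
  | swap x y t =>
    intro f hf
    simp only [pvPicks, List.map_cons, List.map_map, List.sum_cons]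
    have hS : (List.map ((fun q => f q.1 q.2) ∘ (fun q : Int × List Int => (q.1, y :: q.2)) ∘
          (fun q : Int × List Int => (q.1, x :: q.2))) (pvPicks t)).sum =
        (List.map ((fun q => f q.1 q.2) ∘ (fun q : Int × List Int => (q.1, x :: q.2)) ∘
          (fun q : Int × List Int => (q.1, y :: q.2))) (pvPicks t)).sum := by
      apply congrArg List.sum
      apply List.map_congr_left
      intro q hq
      have hql := pvPicks_snd_length _ q hq
      exact hf q.1 _ _ (by simp; omega) (List.Perm.swap x y q.2)
    simp only [Function.comp_def] at hS ⊢
    rw [hS]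
    ring
  | trans h1 h2 ih1 ih2 =>
    intro f hf
    have hlen := h1.length_eq
    exact (ih1 f hf).trans (ih2 f (fun a r r' hl hr => hf a r r' (by omega) hr))

-- pvCount depends on cur and oth only up to permutation
theorem pvCount_perm : ∀ (N : Nat) (c1 o1 c2 o2 : List Int) (prev : Int),
    c1.length + o1.length ≤ N → c1.Perm c2 → o1.Perm o2 →
    pvCount prev c1 o1 = pvCount prev c2 o2 := by
  intro N
  induction N with
  | zero =>
    intro c1 o1 c2 o2 prev hN hc ho
    have h1 : c1 = [] := by cases c1 <;> simp_all
    subst h1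
    rw [(List.Perm.eq_nil hc.symm : c2 = []), pvCount_nil, pvCount_nil]
  | succ N ih =>
    intro c1 o1 c2 o2 prev hN hc ho
    match c1, hc with
    | [], hc =>
      rw [(List.Perm.eq_nil hc.symm : c2 = []), pvCount_nil, pvCount_nil]
    | a :: t, hc =>
      match c2, hc with
      | [], hc => exact absurd hc.eq_nil (by simp)
      | b :: s, hc =>
        rw [pvCount_cons, pvCount_cons]
        have step1 :
            ((pvPicks (a :: t)).map (fun q =>
              if PySem.Set.contains pvPRIMES (prev + q.1) then pvCount q.1 o1 q.2 else 0)).sum =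
            ((pvPicks (b :: s)).map (fun q =>
              if PySem.Set.contains pvPRIMES (prev + q.1) then pvCount q.1 o1 q.2 else 0)).sum := by
          refine pvPicks_sum_perm hc
            (fun x r => if PySem.Set.contains pvPRIMES (prev + x) then pvCount x o1 r else 0) ?_
          intro x r r' hlen hr
          dsimp only
          split_ifs with hmem
          · exact ih o1 r o1 r' x (by simp at hN hlen; omega) (List.Perm.refl o1) hr
          · rfl
        rw [step1]
        apply congrArg List.sum
        apply List.map_congr_left
        intro q hq
        have hql := pvPicks_snd_length _ q hq
        split_ifs with hmem
        · apply ih o1 q.2 o2 q.2 q.1 ?_ ho (List.Perm.refl q.2)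
          have h2 := hc.length_eq
          simp at h2 hN hql
          omega
        · rfl

-- at p = len(beads), B's pure recursion reduces to A's base test '1 + beads[-1] in PRIMES'
theorem pvBase (beads : List Int) (hne : beads ≠ []) (p : Nat) (hp : p = beads.length) :
    pvCount (pvGet beads ((p : Int) - 1)) (pvEvery (beads.drop p)) (pvEvery (beads.drop (p + 1))) =
      (if PySem.Set.contains pvPRIMES (1 + pvGet beads (-1)) then 1 else 0) := by
  subst hp
  rw [List.drop_length, List.drop_of_length_le (by omega), pvEvery_nil, pvCount_nil]
  have hlen1 : 1 ≤ beads.length := List.length_pos_iff.mpr hne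
  have h1 : pvGet beads (-1) = beads.getLast hne := by
    unfold pvGet
    exact PySem.List.pyGetD_neg_one beads 0 hne
  have h2 : pvGet beads ((beads.length : Int) - 1) = beads.getLast hne := by
    unfold pvGet
    have hcast : ((beads.length : Int) - 1) = ((beads.length - 1 : Nat) : Int) := by omega
    rw [hcast, PySem.List.pyGetD_natCast, List.getD_eq_getElem _ _ (by omega),
      List.getLast_eq_getElem]
  rw [h1, h2]

-- the heart: A's fueled backtracking equals B's two-class recursion at every level
theorem pvMain : ∀ (fuel : Nat) (beads : List Int) (p : Nat), beads ≠ [] → p ≤ beads.length →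
    beads.length - p < fuel →
    pvAgo fuel beads (p : Int) =
      pvCount (pvGet beads ((p : Int) - 1)) (pvEvery (beads.drop p)) (pvEvery (beads.drop (p + 1))) := by
  intro fuel
  induction fuel with
  | zero => intro beads p _ _ h3; omega
  | succ fuel ih =>
    intro beads p hne hple hfuel
    by_cases hpn : p = beads.length
    · have hcond : (beads.length : Int) = (p : Int) := by exact_mod_cast hpn.symm
      simp only [pvAgo, if_pos hcond]
      exact (pvBase beads hne p hpn).symm
    · have hlt : p < beads.length := by omega
      have hcond : ¬ ((beads.length : Int) = (p : Int)) := by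
        intro h; exact hpn (by exact_mod_cast h.symm)
      simp only [pvAgo, if_neg hcond]
      -- abbreviations
      have hgp : pvGet beads (p : Int) = beads[p] := by
        unfold pvGet
        rw [PySem.List.pyGetD_natCast, List.getD_eq_getElem _ _ hlt]
      -- rewrite the loop body into 'acc + term i' form, then to a sum
      rw [PySem.List.foldl_congr_mem
        (PySem.List.pyRange ((p:Int) + 2) (beads.length : Int) 2)
        (fun acc i =>
          if PySem.Set.contains pvPRIMES (pvGet beads ((p:Int) - 1) + pvGet beads i) then
            acc + pvAgo fuel (pvSwap beads (p:Int) i) ((p:Int) + 1) else acc)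
        (fun acc i => acc +
          (if PySem.Set.contains pvPRIMES (pvGet beads ((p:Int) - 1) + pvGet beads i) then
            pvAgo fuel (pvSwap beads (p:Int) i) ((p:Int) + 1) else 0))
        _ (by intro acc x _; dsimp only; split_ifs <;> simp)]
      rw [PySem.List.foldl_add _ (fun i =>
          if PySem.Set.contains pvPRIMES (pvGet beads ((p:Int) - 1) + pvGet beads i) then
            pvAgo fuel (pvSwap beads (p:Int) i) ((p:Int) + 1) else 0)]
      -- RHS: peel the head of cur and unfold pvCount
      rw [pvEvery_drop_cons beads p hlt, pvCount_cons]
      simp only [pvPicks, List.map_cons, List.map_map, List.sum_cons]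
      rw [pvPicks_map]
      -- the first branch
      have hcast1 : ((p : Int) + 1) = ((p + 1 : Nat) : Int) := by push_cast; ring
      have hprev1 : pvGet beads (((p + 1 : Nat) : Int) - 1) = beads[p] := by
        have : (((p + 1 : Nat) : Int) - 1) = (p : Int) := by push_cast; ring
        rw [this, hgp]
      have hinit :
          (if PySem.Set.contains pvPRIMES (pvGet beads (p:Int) + pvGet beads ((p:Int) - 1)) then
            pvAgo fuel beads ((p:Int) + 1) else 0) =
          (if PySem.Set.contains pvPRIMES (pvGet beads ((p:Int) - 1) + beads[p]) then
            pvCount beads[p] (pvEvery (beads.drop (p + 1))) (pvEvery (beads.drop (p + 2))) else 0) := by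
        rw [hgp, Int.add_comm]
        split_ifs with hx
        · rw [hcast1, ih beads (p + 1) hne (by omega) (by omega), hprev1]
        · rfl
      rw [hinit]
      congr 1
      -- the loop sum = the sum over the remaining picks
      rw [PySem.List.pyRange_of_pos _ _ (by omega : (0:Int) < 2)]
      rw [List.map_map]
      have hclen : (if (p:Int) + 2 < (beads.length : Int) then
          (((beads.length : Int) - ((p:Int) + 2) + 2 - 1) / 2).toNat else 0) =
          (pvEvery (beads.drop (p + 2))).length := by
        rw [pvEvery_length, List.length_drop]
        split_ifs with h <;> omega
      rw [hclen]
      apply congrArg List.sum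
      apply List.map_congr_left
      intro j hj
      simp only [List.mem_range] at hj
      rw [pvEvery_length, List.length_drop] at hj
      -- the j-th loop index
      have hi : p + 2 + 2 * j < beads.length := by omega
      have hcasti : ((p:Int) + 2 + 2 * (j : Int)) = ((p + 2 + 2 * j : Nat) : Int) := by
        push_cast; ring
      have hgi : pvGet beads ((p + 2 + 2 * j : Nat) : Int) = beads[p + 2 + 2 * j] := by
        unfold pvGet
        rw [PySem.List.pyGetD_natCast, List.getD_eq_getElem _ _ hi]
      have hctj : (pvEvery (beads.drop (p + 2))).getD j 0 = beads[p + 2 + 2 * j] := by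
        rw [List.getD_eq_getElem?_getD, pvEvery_getElem?, List.getElem?_drop,
          List.getElem?_eq_getElem hi]
        rfl
      dsimp only [Function.comp]
      simp only [hcasti, hgi, hctj]
      split_ifs with hx
      · -- the swapped list
        have hswap : pvSwap beads (p:Int) ((p + 2 + 2 * j : Nat) : Int) =
            (beads.set (p + 2 + 2 * j) beads[p]).set p beads[p + 2 + 2 * j] := by
          unfold pvSwap
          rw [hgp, hgi]
          simp only [PySem.List.pySetD_natCast]
        rw [hswap]
        set bp := beads[p] with hbp
        set bi := beads[p + 2 + 2 * j] with hbi
        set beads' := (beads.set (p + 2 + 2 * j) bp).set p bi with hbeads'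
        have hlen' : beads'.length = beads.length := by simp [hbeads']
        have hne' : beads' ≠ [] := by
          intro h
          rw [h] at hlen'
          simp at hlen'
          omega
        rw [hcast1, ih beads' (p + 1) hne' (by omega) (by omega)]
        -- prev of the recursive call is the swapped-in bead
        have hprev' : pvGet beads' (((p + 1 : Nat) : Int) - 1) = bi := by
          unfold pvGet
          have hc : (((p + 1 : Nat) : Int) - 1) = ((p : Nat) : Int) := by push_cast; ring
          rw [hc, PySem.List.pyGetD_natCast,
            List.getD_eq_getElem _ _ (by rw [hlen']; exact hlt)]
          exact List.getElem_set_self (by simp; omega)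
        rw [hprev']
        -- the odd-offset class is untouched by the swap
        have hoth : pvEvery (beads'.drop (p + 1)) = pvEvery (beads.drop (p + 1)) := by
          rw [hbeads']
          rw [pvEvery_drop_set_ne _ _ _ _ (by intro k; omega)]
          have h1 : p + 2 + 2 * j = (p + 1) + 2 * j + 1 := by omega
          rw [h1]
          apply pvEvery_drop_set_ne
          intro k; omega
        -- the even-offset class is the old one with slot j overwritten by the old beads[p]
        have hoth2 : pvEvery (beads'.drop (p + 1 + 1)) =
            (pvEvery (beads.drop (p + 2))).set j bp := by
          rw [hbeads']
          have h12 : p + 1 + 1 = p + 2 := by omega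
          rw [h12]
          rw [pvEvery_drop_set_ne _ _ _ _ (by intro k; omega)]
          exact pvEvery_drop_set_even beads (p + 2) j bp hi
        rw [hoth, hoth2]
        -- permutation step: set j bp ~ bp :: eraseIdx j
        have hjlen : j < (pvEvery (beads.drop (p + 2))).length := by
          rw [pvEvery_length, List.length_drop]; omega
        apply pvCount_perm
          ((pvEvery (beads.drop (p + 1))).length + ((pvEvery (beads.drop (p + 2))).set j bp).length)
          (pvEvery (beads.drop (p + 1))) ((pvEvery (beads.drop (p + 2))).set j bp)
          (pvEvery (beads.drop (p + 1))) (bp :: (pvEvery (beads.drop (p + 2))).eraseIdx j) bi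
          (le_refl _) (List.Perm.refl _) (pv_set_perm _ j bp hjlen)
      · rfl

-- ===== VERDICT (by name: the statement is the Claim_ definition above) =====
theorem count_possible_necklace_arrangements_spec : Claim_equal_count_possible_necklace_arrangements := by
  unfold Claim_equal_count_possible_necklace_arrangements
  intro beads pos _ hPre
  obtain ⟨hne, h0, hle⟩ := hPre
  unfold Spec_count_possible_necklace_arrangements
  obtain ⟨p, rfl⟩ : ∃ p : Nat, pos = (p : Int) := ⟨pos.toNat, by omega⟩
  have hple : p ≤ beads.length := by exact_mod_cast hle
  unfold count_possible_necklace_arrangements count_possible_necklace_arrangements_alt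
  rw [pvMain ((beads.length + 1 - (p : Int)).toNat) beads p hne hple (by omega)]
  by_cases hpn : (beads.length : Int) = (p : Int)
  · rw [if_pos hpn]
    exact pvBase beads hne p (by exact_mod_cast hpn.symm)
  · rw [if_neg hpn]
    rw [PySem.List.slice_from_natCast]
    have hc : ((p : Int) + 1) = ((p + 1 : Nat) : Int) := by push_cast; ring
    rw [hc, PySem.List.slice_from_natCast]
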